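-- pv_equiv track=rewrite | github.com/alonitac/DevOpsJan22 | python_katas/kata_1/questions.py | pair_match
-- ===== SOURCE A (Python) =====
-- def pair_match(men, women):
--     """
--     3 Kata
--
--     This function gets two dictionaries of the type:
--     {
--         "<name>": <age>
--     }
--
--     Where <name> is a string name, and <age> is an integer representing the age
--     The function returns a pair of names (tuple), of from men dict, the other from women dict,
--     where their absolute age differences is the minimal
--
--     e.g.
--     men = {"John": 20, "Abraham": 45}
--     women = {"July": 18, "Kim": 26}
--
--     The returned value should be a tuple ("John", "July") since:
--
--     abs(John - Kim) = abs(20 - 26) = abs(-6) = 6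
--     abs(John - July) = abs(20 - 18) = abs(2) = 2
--     abs(Abraham - Kim) = abs(45 - 26) = abs(19) = 19
--     abs(Abraham - July) = abs(45 - 18) = abs(27) = 27
--
--     :param men: dict mapping name -> age
--     :param women: dict mapping name -> age
--     :return: tuple (men_name, women_name) such their age absolute difference is the minimal
--     """
--     num = len(men.items())
--     index = 0
--     lval = 0
--     new_list = [None] * (num*num)
--     mkey = list(men.keys())
--     mval = list(men.values())
--     wkey = list(women.keys())
--     wval = list(women.values())
--     for i in range(0, num):
--         for f in range(0, num):
--             index = abs(mval[i] - wval[f])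
--             new_list[lval] = [index, mkey[i], wkey[f]]
--             lval += 1
--
--     new_list.sort()
--     return tuple(new_list[0][-2:])
-- ===== SOURCE B (Python) =====
-- def pair_match(men, women):
--     # Single pass keeping a running minimum of (diff, man, woman); no n*n list, no sort.
--     # Like A, only the first len(men) women are considered (A indexes women by men's range).
--     n = len(men)
--     witems = list(women.items())[:n]
--     best = None
--     for mname, mage in men.items():
--         for wname, wage in witems:
--             cand = (abs(mage - wage), mname, wname)
--             if best is None or cand < best:
--                 best = cand
--     return (best[1], best[2])
-- ===== Notes on version B (the rewrite author's own statement) =====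
-- stated objective: faster
-- what changed: B replaces A's build-all-n^2-triples-then-sort-and-take-first with a single streaming minimum of (diff, man_name, woman_name) over the pairs (no materialized n^2 list, no sort), keeping A's exact tie-break and A's pairing of men against the first len(men) women.
import Mathlib
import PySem

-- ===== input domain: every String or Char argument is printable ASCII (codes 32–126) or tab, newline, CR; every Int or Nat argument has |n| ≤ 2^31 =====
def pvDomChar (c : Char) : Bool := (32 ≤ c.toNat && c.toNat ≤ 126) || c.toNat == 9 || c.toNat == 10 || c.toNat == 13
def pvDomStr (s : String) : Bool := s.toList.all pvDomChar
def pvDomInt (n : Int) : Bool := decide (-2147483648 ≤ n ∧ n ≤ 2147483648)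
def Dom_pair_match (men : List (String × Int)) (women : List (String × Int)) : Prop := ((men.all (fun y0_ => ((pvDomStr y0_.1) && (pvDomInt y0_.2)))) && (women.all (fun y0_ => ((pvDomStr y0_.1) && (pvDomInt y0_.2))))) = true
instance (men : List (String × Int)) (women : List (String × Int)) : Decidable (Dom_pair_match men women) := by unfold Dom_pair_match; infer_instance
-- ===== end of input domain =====

-- B replaces A's build-all-n^2-triples-then-sort-and-take-first by a single streaming minimum over
-- the same (diff, man, woman) candidates (no materialized n^2 list, no sort); objective: faster.

-- ===== PORT A =====
-- sort key for new_list.sort(): Python compares the [diff, man, woman] lists lexicographically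
def pvTripKey (t : Int × String × String) : Lex (Int × Lex (String × String)) :=
  toLex (t.1, toLex (t.2.1, t.2.2))

def pair_match (men : List (String × Int)) (women : List (String × Int)) : String × String :=
  let num := men.length
  let mkey := men.map Prod.fst
  let mval := men.map Prod.snd
  let wkey := women.map Prod.fst
  let wval := women.map Prod.snd
  -- the i/f double loop filling new_list (sequential writes to the preallocated list, ported as appends);
  -- mval[i]/wval[f] ported with pyGetD: Pre_ keeps every index in range (A raises IndexError otherwise)
  let newList : List (Int × String × String) :=
    (PySem.List.pyRange 0 (num : Int)).foldl (fun acc i =>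
      (PySem.List.pyRange 0 (num : Int)).foldl (fun acc2 f =>
        acc2 ++ [(|PySem.List.pyGetD mval i 0 - PySem.List.pyGetD wval f 0|,
                  PySem.List.pyGetD mkey i "", PySem.List.pyGetD wkey f "")]) acc) []
  -- new_list.sort(); tuple(new_list[0][-2:]) — new_list[0] raises IndexError on empty men (outside Pre_)
  match PySem.List.sorted newList pvTripKey with
  | [] => ("", "")
  | t :: _ => (t.2.1, t.2.2)

-- ===== PORT B =====
-- Python tuple comparison 'cand < best' on (int, str, str)
def pvTripLt (a b : Int × String × String) : Bool :=
  decide (a.1 < b.1) ||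
    (a.1 == b.1 && (decide (a.2.1 < b.2.1) || (a.2.1 == b.2.1 && decide (a.2.2 < b.2.2))))

-- 'if best is None or cand < best: best = cand'
def pvBestStep (b : Option (Int × String × String)) (cand : Int × String × String) :
    Option (Int × String × String) :=
  match b with
  | none => some cand
  | some bb => if pvTripLt cand bb then some cand else some bb

def pair_match_alt (men : List (String × Int)) (women : List (String × Int)) : String × String :=
  let n := men.length
  let witems := PySem.List.slice women none (some (n : Int))   -- list(women.items())[:n]
  let best := men.foldl (fun b m =>
      witems.foldl (fun b2 w => pvBestStep b2 (|m.2 - w.2|, m.1, w.1)) b) none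
  match best with
  | none => ("", "")   -- unreachable under Pre_ (empty men): Python B raises TypeError there
  | some bb => (bb.2.1, bb.2.2)

-- ===== PRECONDITION & SPEC =====
-- Pre_ excludes exactly the inputs on which Python A raises IndexError: empty men
-- (new_list[0] of an empty list) and fewer women than men (wval[f] for f in range(len(men))).
def Pre_pair_match (men : List (String × Int)) (women : List (String × Int)) : Prop :=
  men ≠ [] ∧ men.length ≤ women.length
instance (men : List (String × Int)) (women : List (String × Int)) : Decidable (Pre_pair_match men women) := by unfold Pre_pair_match; infer_instance

def pvWitness_pair_match : (List (String × Int)) × (List (String × Int)) :=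
  ([("John", 20), ("Abraham", 45)], [("July", 18), ("Kim", 26)])

def Spec_pair_match (men : List (String × Int)) (women : List (String × Int)) (out : String × String) : Prop := out = pair_match_alt men women
instance (men : List (String × Int)) (women : List (String × Int)) (out : String × String) : Decidable (Spec_pair_match men women out) := by unfold Spec_pair_match; infer_instance

-- ===== CLAIM (what is proved, stated in full; the proofs are below) =====
def Claim_equal_pair_match : Prop := ∀ (men : List (String × Int)) (women : List (String × Int)), Dom_pair_match men women → Pre_pair_match men women → Spec_pair_match men women (pair_match men women)

-- ===== LEMMAS AND PROOFS =====

-- the common list of candidate triples, in B's traversal order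
def pvTrips (men : List (String × Int)) (women : List (String × Int)) : List (Int × String × String) :=
  men.flatMap (fun m => (women.take men.length).map (fun w => (|m.2 - w.2|, m.1, w.1)))

theorem pvTripLt_iff (a b : Int × String × String) :
    pvTripLt a b = true ↔ pvTripKey a < pvTripKey b := by
  simp [pvTripLt, pvTripKey, Prod.Lex.lt_iff, beq_iff_eq]

theorem pvTripKey_inj {a b : Int × String × String} (h : pvTripKey a = pvTripKey b) : a = b := by
  obtain ⟨a1, a2, a3⟩ := a
  obtain ⟨b1, b2, b3⟩ := b
  simp [pvTripKey] at h
  obtain ⟨h1, h2, h3⟩ := h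
  simp [h1, h2, h3]

-- B's running minimum: its result is a member of the traversed list and key-minimal on it
theorem pvFoldlBest (l : List (Int × String × String)) :
    ∀ (b r : Option (Int × String × String)), l.foldl pvBestStep b = r →
      (b = none ∧ l = [] ∧ r = none) ∨
      (∃ m, r = some m ∧ (b = some m ∨ m ∈ l) ∧
        (∀ x, b = some x → pvTripKey m ≤ pvTripKey x) ∧
        (∀ y ∈ l, pvTripKey m ≤ pvTripKey y)) := by
  induction l with
  | nil =>
    intro b r h
    simp at h
    cases b with
    | none => left; simp [h.symm]
    | some m =>
      right
      refine ⟨m, h.symm, Or.inl rfl, ?_, by simp⟩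
      intro x hx
      obtain rfl : m = x := Option.some.inj hx
      exact le_rfl
  | cons hd tl ih =>
    intro b r h
    simp only [List.foldl_cons] at h
    rcases ih (pvBestStep b hd) r h with ⟨hb', _, _⟩ | ⟨m, hr, hmem, hbmin, htlmin⟩
    · cases b with
      | none => simp [pvBestStep] at hb'
      | some x0 => simp only [pvBestStep] at hb'; split_ifs at hb'
    · right
      cases b with
      | none =>
        simp only [pvBestStep] at hmem hbmin
        refine ⟨m, hr, ?_, by simp, ?_⟩
        · rcases hmem with h1 | h1
          · obtain rfl : hd = m := Option.some.inj h1
            exact Or.inr (List.mem_cons_self ..)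
          · exact Or.inr (List.mem_cons_of_mem _ h1)
        · intro y hy
          rcases List.mem_cons.mp hy with rfl | hy'
          · exact hbmin y rfl
          · exact htlmin y hy'
      | some x0 =>
        simp only [pvBestStep] at hmem hbmin
        by_cases hlt : pvTripLt hd x0 = true
        · have hkey : pvTripKey hd < pvTripKey x0 := (pvTripLt_iff hd x0).mp hlt
          have hmhd : pvTripKey m ≤ pvTripKey hd := by
            apply hbmin; simp [hlt]
          refine ⟨m, hr, ?_, ?_, ?_⟩
          · rcases hmem with h1 | h1
            · rw [if_pos hlt] at h1
              obtain rfl : hd = m := Option.some.inj h1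
              exact Or.inr (List.mem_cons_self ..)
            · exact Or.inr (List.mem_cons_of_mem _ h1)
          · intro x hx
            obtain rfl : x0 = x := Option.some.inj hx
            exact le_of_lt (lt_of_le_of_lt hmhd hkey)
          · intro y hy
            rcases List.mem_cons.mp hy with rfl | hy'
            · exact hmhd
            · exact htlmin y hy'
        · have hkey : pvTripKey x0 ≤ pvTripKey hd := by
            by_contra hc
            exact hlt ((pvTripLt_iff hd x0).mpr (lt_of_not_ge hc))
          have hmx0 : pvTripKey m ≤ pvTripKey x0 := by
            apply hbmin; simp [hlt]
          refine ⟨m, hr, ?_, ?_, ?_⟩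
          · rcases hmem with h1 | h1
            · rw [if_neg hlt] at h1
              obtain rfl : x0 = m := Option.some.inj h1
              exact Or.inl rfl
            · exact Or.inr (List.mem_cons_of_mem _ h1)
          · intro x hx
            obtain rfl : x0 = x := Option.some.inj hx
            exact hmx0
          · intro y hy
            rcases List.mem_cons.mp hy with rfl | hy'
            · exact le_trans hmx0 hkey
            · exact htlmin y hy'

theorem pvMapRangeGetD {α : Type} (l : List α) (n : Nat) (d : α) (h : n ≤ l.length) :
    (List.range n).map (fun i => l.getD i d) = l.take n := by
  apply List.ext_getElem
  · simp [h]
  · intro i h1 h2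
    simp at h1 ⊢
    rw [List.getElem?_eq_getElem (by omega : i < l.length)]
    simp

-- A's index double loop builds exactly the candidate list pvTrips
theorem pvNewListEq (men women : List (String × Int)) (h : men.length ≤ women.length) :
    (PySem.List.pyRange 0 (men.length : Int)).foldl (fun acc i =>
      (PySem.List.pyRange 0 (men.length : Int)).foldl (fun acc2 f =>
        acc2 ++ [(|PySem.List.pyGetD (men.map Prod.snd) i 0 - PySem.List.pyGetD (women.map Prod.snd) f 0|,
                  PySem.List.pyGetD (men.map Prod.fst) i "", PySem.List.pyGetD (women.map Prod.fst) f "")]) acc) []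
    = pvTrips men women := by
  rw [PySem.List.pyRange_zero_natCast]
  simp only [List.foldl_map]
  simp only [PySem.List.foldl_append_singleton_eq_map]
  rw [PySem.List.foldl_append_eq_flatMap]
  rw [List.nil_append]
  have hmen : (List.range men.length).map (fun i => men.getD i ("", 0)) = men := by
    rw [pvMapRangeGetD men men.length ("", 0) le_rfl, List.take_length]
  have hwom : (List.range men.length).map (fun f => women.getD f ("", 0)) = women.take men.length := by
    exact pvMapRangeGetD women men.length ("", 0) h
  unfold pvTrips
  have hflat : men.flatMap (fun m => (women.take men.length).map (fun w => (|m.2 - w.2|, m.1, w.1)))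
      = ((List.range men.length).map (fun i => men.getD i ("", 0))).flatMap
          (fun m => (women.take men.length).map (fun w => (|m.2 - w.2|, m.1, w.1))) := by
    rw [hmen]
  rw [hflat, List.flatMap_map]
  apply List.flatMap_congr
  intro i hi
  have hilt : i < men.length := List.mem_range.mp hi
  rw [← hwom, List.map_map]
  apply List.map_congr_left
  intro f hf
  have hflt : f < men.length := List.mem_range.mp hf
  simp only [Function.comp]
  rw [PySem.List.pyGetD_natCast, PySem.List.pyGetD_natCast, PySem.List.pyGetD_natCast,
      PySem.List.pyGetD_natCast]
  rw [List.getD_eq_getElem _ _ (by simpa using hilt), List.getD_eq_getElem _ _ (by simp; omega),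
      List.getD_eq_getElem _ _ (by simpa using hilt), List.getD_eq_getElem _ _ (by simp; omega),
      List.getD_eq_getElem _ _ hilt, List.getD_eq_getElem _ _ (by omega)]
  simp

-- B's nested fold is the running minimum over pvTrips
theorem pvAltEqFoldTrips (men women : List (String × Int)) :
    pair_match_alt men women =
      (match (pvTrips men women).foldl pvBestStep none with
       | none => ("", "")
       | some bb => (bb.2.1, bb.2.2)) := by
  unfold pair_match_alt
  simp only []
  rw [PySem.List.slice_to women (by positivity : (0:Int) ≤ (men.length : Int))]
  rw [Int.toNat_natCast]
  rw [pvTrips, List.foldl_flatMap]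
  simp only [List.foldl_map]

theorem pvTripsNe (men women : List (String × Int)) (h1 : men ≠ []) (h2 : men.length ≤ women.length) :
    pvTrips men women ≠ [] := by
  obtain ⟨m, ms, rfl⟩ := List.exists_cons_of_ne_nil h1
  have hw : women ≠ [] := by intro hww; subst hww; simp at h2
  simp [pvTrips, hw]

theorem pvMain (men women : List (String × Int)) (h1 : men ≠ []) (h2 : men.length ≤ women.length) :
    pair_match men women = pair_match_alt men women := by
  unfold pair_match
  simp only []
  rw [pvNewListEq men women h2]
  rw [pvAltEqFoldTrips]
  cases hs : PySem.List.sorted (pvTrips men women) pvTripKey with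
  | nil =>
    exact absurd ((PySem.List.sorted_eq_nil_iff _ _ _).mp hs) (pvTripsNe men women h1 h2)
  | cons hd tl =>
    cases hf : (pvTrips men women).foldl pvBestStep none with
    | none =>
      rcases pvFoldlBest _ none _ hf with ⟨_, hnil, _⟩ | ⟨m', hm', _⟩
      · exact absurd hnil (pvTripsNe men women h1 h2)
      · exact absurd hm' (by simp)
    | some m =>
      rcases pvFoldlBest _ none _ hf with ⟨_, hnil, _⟩ | ⟨m', hm', hmem, _, hmin⟩
      · exact absurd hnil (pvTripsNe men women h1 h2)
      · obtain rfl : m = m' := Option.some.inj hm'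
        have hmemtrips : m ∈ pvTrips men women := by
          rcases hmem with hcontra | hok
          · exact absurd hcontra (by simp)
          · exact hok
        have hhdmem : hd ∈ pvTrips men women := by
          have := (PySem.List.sorted_perm (pvTrips men women) pvTripKey false).mem_iff (a := hd)
          exact this.mp (by rw [hs]; exact List.mem_cons_self ..)
        have hle1 : pvTripKey hd ≤ pvTripKey m := PySem.List.key_head_sorted_le _ _ hs m hmemtrips
        have hle2 : pvTripKey m ≤ pvTripKey hd := hmin hd hhdmem
        have : hd = m := pvTripKey_inj (le_antisymm hle1 hle2)
        rw [this]

-- ===== VERDICT (by name: the statement is the Claim_ definition above) =====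
theorem pair_match_spec : Claim_equal_pair_match := by
  intro men women _ hpre
  unfold Spec_pair_match
  exact pvMain men women hpre.1 hpre.2
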